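-- pv_equiv track=rewrite | github.com/hzhe0083-source/RoboClaw | roboclaw/embodied/onboarding/controller.py | _select_serial_device
-- ===== SOURCE A (Python) =====
-- def _select_serial_device(output: str) -> str | None:
--     for line in output.splitlines():
--         candidate = line.strip()
--         if candidate.startswith("/dev/serial/by-id/"):
--             return candidate
--     for line in output.splitlines():
--         candidate = line.strip()
--         if candidate.startswith("/dev/ttyACM") or candidate.startswith("/dev/ttyUSB"):
--             return candidate
--     return None
-- ===== SOURCE B (Python) =====
-- def _select_serial_device(output: str) -> str | None:
--     fallback = None
--     for line in output.splitlines():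
--         candidate = line.strip()
--         if candidate.startswith("/dev/serial/by-id/"):
--             return candidate
--         if fallback is None and (candidate.startswith("/dev/ttyACM") or candidate.startswith("/dev/ttyUSB")):
--             fallback = candidate
--     return fallback
-- ===== Notes on version B (the rewrite author's own statement) =====
-- stated objective: simpler
-- what changed: Replaced A's two full passes over splitlines (one for by-id, one for ACM/USB) with a single pass that returns a by-id candidate immediately and records the first ACM/USB candidate as a fallback returned after the loop.
import Mathlib
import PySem

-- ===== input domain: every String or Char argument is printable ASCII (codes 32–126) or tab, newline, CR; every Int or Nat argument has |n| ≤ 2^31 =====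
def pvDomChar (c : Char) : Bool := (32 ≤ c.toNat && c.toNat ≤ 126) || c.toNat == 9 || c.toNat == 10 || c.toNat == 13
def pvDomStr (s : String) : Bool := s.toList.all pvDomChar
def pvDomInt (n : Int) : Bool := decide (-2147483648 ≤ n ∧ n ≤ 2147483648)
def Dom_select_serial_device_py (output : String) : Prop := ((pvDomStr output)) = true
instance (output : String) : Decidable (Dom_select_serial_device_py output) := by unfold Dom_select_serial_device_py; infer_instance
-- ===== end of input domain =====

-- ===== PORT A =====
-- loop 1 of A: first stripped line starting with "/dev/serial/by-id/"
def pvLoop1 : List String → Option String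
  | [] => none
  | l :: rest =>
    let c := PySem.Str.strip l
    if PySem.Str.startswith c "/dev/serial/by-id/" then some c else pvLoop1 rest

-- loop 2 of A: first stripped line starting with "/dev/ttyACM" or "/dev/ttyUSB"
def pvLoop2 : List String → Option String
  | [] => none
  | l :: rest =>
    let c := PySem.Str.strip l
    if PySem.Str.startswith c "/dev/ttyACM" || PySem.Str.startswith c "/dev/ttyUSB" then some c
    else pvLoop2 rest

def select_serial_device_py (output : String) : Option String :=
  match pvLoop1 (PySem.Str.splitlines output) with
  | some c => some c
  | none => pvLoop2 (PySem.Str.splitlines output)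

-- ===== PORT B =====
-- B: single pass, return by-id at once, record first ACM/USB as fallback
def pvLoopB : List String → Option String → Option String
  | [], fb => fb
  | l :: rest, fb =>
    let c := PySem.Str.strip l
    if PySem.Str.startswith c "/dev/serial/by-id/" then some c
    else if fb.isNone && (PySem.Str.startswith c "/dev/ttyACM" || PySem.Str.startswith c "/dev/ttyUSB") then
      pvLoopB rest (some c)
    else pvLoopB rest fb

def select_serial_device_py_alt (output : String) : Option String :=
  pvLoopB (PySem.Str.splitlines output) none

-- ===== PRECONDITION & SPEC =====
def Spec_select_serial_device_py (output : String) (out : Option String) : Prop := out = select_serial_device_py_alt output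
instance (output : String) (out : Option String) : Decidable (Spec_select_serial_device_py output out) := by unfold Spec_select_serial_device_py; infer_instance

-- ===== CLAIM (what is proved, stated in full; the proofs are below) =====
def Claim_equal_select_serial_device_py : Prop := ∀ (output : String), Dom_select_serial_device_py output → Spec_select_serial_device_py output (select_serial_device_py output)

-- ===== LEMMAS AND PROOFS =====

-- ===== VERDICT (by name: the statement is the Claim_ definition above) =====
theorem pvLoopB_eq (ls : List String) (fb : Option String) :
    pvLoopB ls fb =
      match pvLoop1 ls with
      | some c => some c
      | none => match fb with | some x => some x | none => pvLoop2 ls := by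
  induction ls generalizing fb with
  | nil => cases fb <;> simp [pvLoopB, pvLoop1, pvLoop2]
  | cons l rest ih =>
    simp only [pvLoopB, pvLoop1, pvLoop2]
    split_ifs with h1 h2 <;> cases fb <;> simp_all [ih]

theorem select_serial_device_py_spec : Claim_equal_select_serial_device_py := by
  intro output _
  unfold Spec_select_serial_device_py select_serial_device_py select_serial_device_py_alt
  rw [pvLoopB_eq]
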